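-- pv_equiv track=rewrite | github.com/JeromeKnappett/XRNF | scripts/homecomp/utils.py | modes2D
-- ===== SOURCE A (Python) =====
-- import itertools
--
-- def modes2D(m,N):
--     """
--     return N pairs of Transverse Gauss-Hermite Mode Order pairs with order up to m.
--
--     """
--     A=list()
--     for i in range(1,m+1):
--        A.append ( list(itertools.product([0,i],repeat=2)))
--
--     # combine
--     A=list(itertools.chain.from_iterable(A))
--
--     # remove duplicates
--     temp = []
--     for a,b in A:
--         if (a,b) not in temp: #to check for the duplicate tuples
--             temp.append((a,b))
--
--     return temp[0:N]
-- ===== SOURCE B (Python) =====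
-- def modes2D(m, N):
--     """
--     return N pairs of Transverse Gauss-Hermite Mode Order pairs with order up to m.
--
--     Closed form: the deduplicated sequence has 3*m+1 entries (for m >= 1); the
--     entry at index j is computed directly from j, so nothing is generated and
--     filtered.
--     """
--     L = 3 * m + 1 if m >= 1 else 0
--
--     def pair(j):
--         if j == 0:
--             return (0, 0)
--         i = (j - 1) // 3 + 1
--         r = (j - 1) % 3
--         if r == 0:
--             return (0, i)
--         if r == 1:
--             return (i, 0)
--         return (i, i)
--
--     return [pair(j) for j in range(L)][:N]
-- ===== Notes on version B (the rewrite author's own statement) =====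
-- stated objective: faster
-- what changed: Computes the j-th pair directly from its index by a closed-form //3 and %3 formula over range(3m+1) instead of generating all itertools products and filtering duplicates with an O(n^2) membership scan.
import Mathlib
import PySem

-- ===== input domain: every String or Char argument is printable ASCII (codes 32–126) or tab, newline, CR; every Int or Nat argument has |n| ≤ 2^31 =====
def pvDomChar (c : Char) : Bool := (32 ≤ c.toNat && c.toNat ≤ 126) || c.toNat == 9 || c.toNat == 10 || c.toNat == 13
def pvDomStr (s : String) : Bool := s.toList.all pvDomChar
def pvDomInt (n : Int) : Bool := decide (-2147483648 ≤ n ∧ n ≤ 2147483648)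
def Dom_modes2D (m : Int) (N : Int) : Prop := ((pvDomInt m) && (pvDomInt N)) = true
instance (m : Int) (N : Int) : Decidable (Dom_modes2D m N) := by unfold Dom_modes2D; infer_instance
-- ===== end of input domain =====

-- B computes the j-th pair of the deduplicated sequence by a closed-form index formula
-- (length 3m+1, pair from j via //3 and %3) instead of generating products and
-- filtering duplicates by membership scan.

-- ===== PORT A =====
-- itertools.product([0,i], repeat=2) is ported by hand as the explicit 4-element list
-- [(0,0),(0,i),(i,0),(i,i)] — exact for a 2-element input repeated twice.
def modes2D (m : Int) (N : Int) : List (Int × Int) :=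
  PySem.List.slice                            -- temp[0:N]
    (-- temp: the dedup loop over A2
     (-- A2 = chain.from_iterable(A); A = the per-order product lists
      ((PySem.List.pyRange 1 (m+1) 1).foldl
        (fun acc i => acc ++ [[((0:Int),(0:Int)), (0,i), (i,0), (i,i)]])
        ([] : List (List (Int × Int)))).flatten).foldl
       (fun t p => if p ∈ t then t else t ++ [p]) [])
    (some 0) (some N)

-- ===== PORT B =====
-- pair(j): the j-th element of the deduplicated sequence, computed from j alone
def pvPairB (j : Int) : Int × Int :=
  if j = 0 then ((0:Int), (0:Int))
  else
    let i := PySem.Int.floordiv (j - 1) 3 + 1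
    let r := PySem.Int.mod (j - 1) 3
    if r = 0 then (0, i) else if r = 1 then (i, 0) else (i, i)

def modes2D_alt (m : Int) (N : Int) : List (Int × Int) :=
  let L : Int := if 1 ≤ m then 3 * m + 1 else 0
  PySem.List.slice ((PySem.List.pyRange 0 L 1).map pvPairB) none (some N)   -- [pair(j) for j in range(L)][:N]

-- ===== PRECONDITION & SPEC =====
def Spec_modes2D (m : Int) (N : Int) (out : List (Int × Int)) : Prop := out = modes2D_alt m N
instance (m : Int) (N : Int) (out : List (Int × Int)) : Decidable (Spec_modes2D m N out) := by unfold Spec_modes2D; infer_instance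

-- ===== CLAIM (what is proved, stated in full; the proofs are below) =====
def Claim_equal_modes2D : Prop := ∀ (m : Int) (N : Int), Dom_modes2D m N → Spec_modes2D m N (modes2D m N)

-- ===== LEMMAS AND PROOFS =====

-- the dedup step of A's 'if (a,b) not in temp: temp.append((a,b))'
def pvDstep (t : List (Int × Int)) (p : Int × Int) : List (Int × Int) :=
  if p ∈ t then t else t ++ [p]

def pvBlk4 (i : Int) : List (Int × Int) := [((0:Int),(0:Int)), (0,i), (i,0), (i,i)]
def pvBlk3 (i : Int) : List (Int × Int) := [((0:Int),i), (i,0), (i,i)]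

-- every pair already collected after orders 1..n has both components ≤ n
lemma pvBound (n : Nat) :
    ∀ p ∈ (List.range n).flatMap (fun k : Nat => pvBlk3 (1 + (k:Int))),
      p.1 ≤ (n:Int) ∧ p.2 ≤ (n:Int) := by
  intro p hp
  simp only [List.mem_flatMap, List.mem_range] at hp
  obtain ⟨k, hk, hpk⟩ := hp
  have hk' : (k:Int) + 1 ≤ (n:Int) := by exact_mod_cast hk
  simp only [pvBlk3, List.mem_cons, List.not_mem_nil, or_false] at hpk
  rcases hpk with h | h | h <;> subst h <;> constructor <;> simp <;> omega

-- A's dedup fold over the concatenated blocks equals the canonical deduplicated list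
lemma pvMain (n : Nat) :
    ((List.range (n+1)).flatMap (fun k : Nat => pvBlk4 (1 + (k:Int)))).foldl pvDstep []
      = ((0:Int),(0:Int)) :: (List.range (n+1)).flatMap (fun k : Nat => pvBlk3 (1 + (k:Int))) := by
  induction n with
  | zero => decide
  | succ n ih =>
    rw [List.range_succ, List.flatMap_append, List.foldl_append, ih]
    have hB := pvBound (n+1)
    set Q := (List.range (n+1)).flatMap (fun k : Nat => pvBlk3 (1 + (k:Int))) with hQ
    have h1 : ((0:Int), 1 + ((n+1:Nat):Int)) ∉ Q := fun h => by
      have := (hB _ h).2; push_cast at this ⊢; omega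
    have h2 : ((1 + ((n+1:Nat):Int)), (0:Int)) ∉ Q := fun h => by
      have := (hB _ h).1; push_cast at this ⊢; omega
    have h3 : ((1 + ((n+1:Nat):Int)), (1 + ((n+1:Nat):Int))) ∉ Q := fun h => by
      have := (hB _ h).1; push_cast at this ⊢; omega
    have hne : (1 + ((n+1:Nat):Int)) ≠ 0 := by push_cast; omega
    have m1 : ((0:Int), 1 + ((n+1:Nat):Int)) ∉ (((0:Int),(0:Int)) :: Q) := by
      intro h
      rcases List.mem_cons.mp h with h | h
      · exact hne (congrArg Prod.snd h)
      · exact h1 h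
    have m2 : ((1 + ((n+1:Nat):Int)), (0:Int))
        ∉ ((((0:Int),(0:Int)) :: Q) ++ [((0:Int), 1 + ((n+1:Nat):Int))]) := by
      intro h
      rcases List.mem_append.mp h with h | h
      · rcases List.mem_cons.mp h with h | h
        · exact hne (congrArg Prod.fst h)
        · exact h2 h
      · simp only [List.mem_singleton, Prod.mk.injEq] at h
        exact hne h.1
    have m3 : ((1 + ((n+1:Nat):Int)), (1 + ((n+1:Nat):Int)))
        ∉ (((((0:Int),(0:Int)) :: Q) ++ [((0:Int), 1 + ((n+1:Nat):Int))])
            ++ [((1 + ((n+1:Nat):Int)), (0:Int))]) := by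
      intro h
      rcases List.mem_append.mp h with h | h
      · rcases List.mem_append.mp h with h | h
        · rcases List.mem_cons.mp h with h | h
          · exact hne (congrArg Prod.fst h)
          · exact h3 h
        · simp only [List.mem_singleton, Prod.mk.injEq] at h
          exact hne h.1
      · simp only [List.mem_singleton, Prod.mk.injEq] at h
        exact hne h.2
    simp only [List.flatMap_singleton, pvBlk4, List.foldl_cons, List.foldl_nil]
    rw [show pvDstep (((0:Int),(0:Int)) :: Q) ((0:Int),(0:Int)) = ((0:Int),(0:Int)) :: Q from by
          unfold pvDstep; rw [if_pos List.mem_cons_self]]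
    rw [show pvDstep (((0:Int),(0:Int)) :: Q) ((0:Int), 1 + ((n+1:Nat):Int))
          = (((0:Int),(0:Int)) :: Q) ++ [((0:Int), 1 + ((n+1:Nat):Int))] from by
          unfold pvDstep; rw [if_neg m1]]
    rw [show pvDstep ((((0:Int),(0:Int)) :: Q) ++ [((0:Int), 1 + ((n+1:Nat):Int))])
            ((1 + ((n+1:Nat):Int)), (0:Int))
          = ((((0:Int),(0:Int)) :: Q) ++ [((0:Int), 1 + ((n+1:Nat):Int))])
              ++ [((1 + ((n+1:Nat):Int)), (0:Int))] from by
          unfold pvDstep; rw [if_neg m2]]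
    rw [show pvDstep (((((0:Int),(0:Int)) :: Q) ++ [((0:Int), 1 + ((n+1:Nat):Int))])
              ++ [((1 + ((n+1:Nat):Int)), (0:Int))])
            ((1 + ((n+1:Nat):Int)), (1 + ((n+1:Nat):Int)))
          = (((((0:Int),(0:Int)) :: Q) ++ [((0:Int), 1 + ((n+1:Nat):Int))])
              ++ [((1 + ((n+1:Nat):Int)), (0:Int))]) ++ [((1 + ((n+1:Nat):Int)), (1 + ((n+1:Nat):Int)))] from by
          unfold pvDstep; rw [if_neg m3]]
    simp only [List.range_succ, List.flatMap_append, List.flatMap_cons,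
      List.flatMap_nil, hQ, pvBlk3, List.cons_append, List.append_assoc, List.nil_append,
      List.append_nil]

-- flatten of the singleton-wrapped blocks is the blocks' concatenation
lemma pvFlat (L : List Nat) :
    (L.flatMap (fun a : Nat =>
        [[((0:Int),(0:Int)), (0,1+(a:Int)), (1+(a:Int),0), (1+(a:Int),1+(a:Int))]])).flatten
      = L.flatMap (fun k : Nat => pvBlk4 (1 + (k:Int))) := by
  induction L with
  | nil => rfl
  | cons a L ih => simp [pvBlk4, ih]

-- evaluating B's index formula at the three indices of order k+1
lemma pvPairB_eval (k : Nat) :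
    pvPairB ((3*k+1:Nat):Int) = ((0:Int), 1 + (k:Int))
    ∧ pvPairB ((3*k+2:Nat):Int) = (1 + (k:Int), (0:Int))
    ∧ pvPairB ((3*k+3:Nat):Int) = (1 + (k:Int), 1 + (k:Int)) := by
  have e1 : ((3*k+1:Nat):Int) - 1 = ((3*k:Nat):Int) := by push_cast; ring
  have e2 : ((3*k+2:Nat):Int) - 1 = ((3*k+1:Nat):Int) := by push_cast; ring
  have e3 : ((3*k+3:Nat):Int) - 1 = ((3*k+2:Nat):Int) := by push_cast; ring
  have h3 : ((3:Nat):Int) = (3:Int) := by norm_num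
  refine ⟨?_, ?_, ?_⟩ <;> unfold pvPairB
  · rw [if_neg (by push_cast; omega), e1, ← h3,
      PySem.Int.floordiv_natCast, PySem.Int.mod_natCast]
    simp only [Nat.mul_mod_right]
    rw [if_pos (by norm_num)]
    have : (3*k) / 3 = k := by omega
    rw [this]; simp [Prod.ext_iff]; ring
  · rw [if_neg (by push_cast; omega), e2, ← h3,
      PySem.Int.floordiv_natCast, PySem.Int.mod_natCast]
    have hm : (3*k+1) % 3 = 1 := by omega
    have hd : (3*k+1) / 3 = k := by omega
    rw [hm, hd]
    rw [if_neg (by norm_num), if_pos (by norm_num)]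
    simp [Prod.ext_iff]; ring
  · rw [if_neg (by push_cast; omega), e3, ← h3,
      PySem.Int.floordiv_natCast, PySem.Int.mod_natCast]
    have hm : (3*k+2) % 3 = 2 := by omega
    have hd : (3*k+2) / 3 = k := by omega
    rw [hm, hd]
    rw [if_neg (by norm_num), if_neg (by norm_num)]
    simp [Prod.ext_iff]; ring

-- B's indexed map over range(3n+1) equals the canonical deduplicated list
lemma pvMapB (n : Nat) :
    (List.range (3*n+1)).map (fun j : Nat => pvPairB (j:Int))
      = ((0:Int),(0:Int)) :: (List.range n).flatMap (fun k : Nat => pvBlk3 (1 + (k:Int))) := by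
  induction n with
  | zero => simp [pvPairB]
  | succ n ih =>
    obtain ⟨p1, p2, p3⟩ := pvPairB_eval n
    rw [show 3*(n+1)+1 = ((3*n+3)+1) from by ring, List.range_succ,
        show (3*n+3) = ((3*n+2)+1) from by ring, List.range_succ,
        show (3*n+2) = ((3*n+1)+1) from by ring, List.range_succ]
    simp only [List.map_append, List.map_cons, List.map_nil, ih]
    rw [show (3*n+1+1) = 3*n+2 from by ring, show (3*n+2+1) = 3*n+3 from by ring,
        p1, p2, p3, List.range_succ, List.flatMap_append, List.flatMap_singleton]
    simp [pvBlk3]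

theorem modes2D_spec : Claim_equal_modes2D := by
  intro m N _
  unfold Spec_modes2D modes2D modes2D_alt
  rw [PySem.List.foldl_append_eq_flatMap, PySem.List.slice_zero_start]
  by_cases hm : 1 ≤ m
  · rw [if_pos hm, PySem.List.pyRange_one]
    have hmn : ((m + 1 - 1).toNat) = m.toNat := by omega
    obtain ⟨n, hn⟩ : ∃ n : Nat, m.toNat = n + 1 := ⟨m.toNat - 1, by omega⟩
    rw [hmn, hn]
    simp only [List.nil_append, List.flatMap_map]
    rw [pvFlat]
    rw [show (fun (t : List (Int × Int)) (p : Int × Int) => if p ∈ t then t else t ++ [p])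
          = pvDstep from rfl]
    rw [pvMain n]
    rw [PySem.List.pyRange_zero, show ((3*m+1).toNat) = 3*(n+1)+1 from by omega,
        List.map_map]
    rw [show ((pvPairB ∘ fun k : Nat => (k:Int)) : Nat → Int × Int)
          = (fun j : Nat => pvPairB (j:Int)) from rfl]
    rw [pvMapB (n+1)]
  · rw [if_neg hm, PySem.List.pyRange_one_eq_nil (by omega)]
    simp
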